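-- pv_equiv track=rewrite | github.com/yooji0415/Coding_Test | 이코테/3회차/그리디/모험가_길드.py | solution
-- ===== SOURCE A (Python) =====
-- def solution(n, array):
--     answer = 0
--     array.sort()
--     cnt = 0
--     max_num = 0
--     for num in array:
--         max_num = max(num, max_num)
--         cnt += 1
--         if cnt >= max_num:
--             answer += 1
--             cnt = 0
--             max_num = 0
--     return answer
-- ===== SOURCE B (Python) =====
-- def solution(n, array):
--     # Counting-based greedy: clamp fear levels into [1, m+1], count them, then a divmod sweep.
--     # (A sorts `array` in place; B leaves it untouched -- return-value equivalence only.)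
--     m = len(array)
--     counts = {}
--     for num in array:
--         f = num if num >= 1 else 1
--         if f > m:
--             f = m + 1
--         counts[f] = counts.get(f, 0) + 1
--     answer = 0
--     cnt = 0
--     for v in range(1, m + 2):
--         cnt += counts.get(v, 0)
--         answer += cnt // v
--         cnt = cnt % v
--     return answer
-- ===== Notes on version B (the rewrite author's own statement) =====
-- stated objective: alternative
-- what changed: Replaces the sort-then-scan greedy with a counting pass (fear levels clamped into [1, n+1] into a dict counter) followed by an arithmetic divmod sweep over the value range; no sort and no per-element greedy loop.
import Mathlib
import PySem

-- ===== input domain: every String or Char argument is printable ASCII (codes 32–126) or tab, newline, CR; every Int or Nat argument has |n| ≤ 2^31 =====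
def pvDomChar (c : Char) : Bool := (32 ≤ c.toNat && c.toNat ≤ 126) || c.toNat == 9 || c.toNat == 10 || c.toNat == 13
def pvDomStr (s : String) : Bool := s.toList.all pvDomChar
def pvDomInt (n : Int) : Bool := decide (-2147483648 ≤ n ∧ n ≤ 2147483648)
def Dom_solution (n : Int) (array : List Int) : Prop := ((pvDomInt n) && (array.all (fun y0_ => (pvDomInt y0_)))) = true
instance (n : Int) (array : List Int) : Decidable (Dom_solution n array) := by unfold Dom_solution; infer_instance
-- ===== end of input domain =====

-- B replaces A's sort + per-element greedy scan by a counting pass and an arithmetic divmod sweep (no sort).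
-- A sorts `array` in place while B leaves it untouched: the equivalence proved is about the return value.

-- ===== PORT A =====
-- step of A's for-loop, state (answer, cnt, max_num)
def solutionStepA (s : Int × Int × Int) (num : Int) : Int × Int × Int :=
  let answer := s.1
  let cnt := s.2.1
  let max_num := s.2.2
  let max_num := max num max_num
  let cnt := cnt + 1
  if cnt ≥ max_num then (answer + 1, 0, 0) else (answer, cnt, max_num)

def solution (n : Int) (array : List Int) : Int :=
  ((PySem.List.sorted array id false).foldl solutionStepA (0, 0, 0)).1

-- ===== PORT B =====
-- clamped fear level: f = num if num >= 1 else 1; if f > m: f = m + 1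
def solutionClamp (m : Int) (num : Int) : Int :=
  let f := if num ≥ 1 then num else 1
  if f > m then m + 1 else f

-- step of B's second for-loop, state (answer, cnt)
def solutionStepB (counts : PySem.Dict Int Int) (p : Int × Int) (v : Int) : Int × Int :=
  let cnt := p.2 + counts.getD v 0
  (p.1 + PySem.Int.floordiv cnt v, PySem.Int.mod cnt v)

def solution_alt (n : Int) (array : List Int) : Int :=
  let m : Int := array.length
  let counts := array.foldl (fun d num => d.insert (solutionClamp m num) (d.getD (solutionClamp m num) 0 + 1)) PySem.Dict.empty
  ((PySem.List.pyRange 1 (m + 2) 1).foldl (solutionStepB counts) (0, 0)).1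

-- ===== PRECONDITION & SPEC =====
def Spec_solution (n : Int) (array : List Int) (out : Int) : Prop := out = solution_alt n array
instance (n : Int) (array : List Int) (out : Int) : Decidable (Spec_solution n array out) := by unfold Spec_solution; infer_instance

-- ===== CLAIM (what is proved, stated in full; the proofs are below) =====
def Claim_equal_solution : Prop := ∀ (n : Int) (array : List Int), Dom_solution n array → Spec_solution n array (solution n array)

-- ===== LEMMAS AND PROOFS =====

-- A's loop with the max_num component eliminated: on a sorted list, max_num = max num 0
def solutionStepC (p : Int × Int) (num : Int) : Int × Int :=
  if p.2 + 1 ≥ max num 0 then (p.1 + 1, 0) else (p.1, p.2 + 1)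

-- pure greedy step on clamped values
def solutionStepV (p : Int × Int) (v : Int) : Int × Int :=
  if p.2 + 1 ≥ v then (p.1 + 1, 0) else (p.1, p.2 + 1)

lemma foldA_eq_foldC (L : List Int) : ∀ (ans cnt M : Int), 0 ≤ M → (∀ x ∈ L, M ≤ max x 0) →
    L.Pairwise (· ≤ ·) →
    (L.foldl solutionStepA (ans, cnt, M)).1 = (L.foldl solutionStepC (ans, cnt)).1 := by
  induction L with
  | nil => intros; rfl
  | cons x T ih =>
    intro ans cnt M hM hlb hp
    have hx : M ≤ max x 0 := hlb x (by simp)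
    have hmax : max x M = max x 0 := by omega
    have hpT : T.Pairwise (· ≤ ·) := hp.of_cons
    have hxT : ∀ y ∈ T, x ≤ y := fun y hy => (List.pairwise_cons.mp hp).1 y hy
    simp only [List.foldl_cons, solutionStepA, solutionStepC, hmax]
    by_cases h : cnt + 1 ≥ max x 0
    · simp only [h, if_pos]
      exact ih _ _ _ le_rfl (fun y hy => by omega) hpT
    · simp only [h, if_false]
      exact ih _ _ _ (by omega) (fun y hy => by have := hxT y hy; omega) hpT

lemma foldC_eq_foldV (L : List Int) (m : Int) : ∀ (ans cnt : Int), 0 ≤ cnt →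
    cnt + L.length ≤ m →
    L.foldl solutionStepC (ans, cnt) = (L.map (solutionClamp m)).foldl solutionStepV (ans, cnt) := by
  induction L with
  | nil => intros; rfl
  | cons x T ih =>
    intro ans cnt h0 hm
    simp only [List.length_cons] at hm
    have hcond : (cnt + 1 ≥ max x 0) ↔ (cnt + 1 ≥ solutionClamp m x) := by
      simp only [solutionClamp]; split_ifs <;> omega
    simp only [List.map_cons, List.foldl_cons, solutionStepC, solutionStepV]
    by_cases h : cnt + 1 ≥ max x 0
    · rw [if_pos h, if_pos (hcond.mp h)]
      exact ih _ _ le_rfl (by push_cast at hm ⊢; omega)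
    · rw [if_neg h, if_neg (fun hc => h (hcond.mpr hc))]
      exact ih _ _ (by omega) (by push_cast at hm ⊢; omega)

lemma foldV_replicate (v : Int) (hv : 1 ≤ v) : ∀ (c : Nat) (ans cnt : Int), 0 ≤ cnt → cnt < v →
    (List.replicate c v).foldl solutionStepV (ans, cnt)
      = (ans + (cnt + c) / v, (cnt + c) % v) := by
  intro c
  induction c with
  | zero =>
    intro ans cnt h0 hlt
    simp [Int.ediv_eq_zero_of_lt h0 hlt, Int.emod_eq_of_lt h0 hlt]
  | succ c ih =>
    intro ans cnt h0 hlt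
    rw [List.replicate_succ]
    simp only [List.foldl_cons, solutionStepV]
    by_cases h : cnt + 1 ≥ v
    · have hev : cnt + 1 = v := by omega
      rw [if_pos h, ih (ans + 1) 0 le_rfl (by omega)]
      have h1 : (cnt + ((c : Int) + 1)) = (c : Int) + v * 1 := by omega
      push_cast
      rw [h1, Int.add_mul_ediv_left _ _ (by omega : v ≠ 0), Int.add_mul_emod_self_left]
      simp only [zero_add, Prod.mk.injEq]; exact ⟨by ring, trivial⟩
    · rw [if_neg h, ih ans (cnt + 1) (by omega) (by omega)]
      push_cast
      ring_nf

lemma sorted_split (v : Int) (S : List Int) (hs : S.Pairwise (· ≤ ·)) (hlb : ∀ x ∈ S, v ≤ x) :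
    S = List.replicate (S.count v) v ++ S.filter (fun x => v < x) := by
  induction S with
  | nil => simp
  | cons x T ih =>
    have hxT := (List.pairwise_cons.mp hs).1
    by_cases hx : x = v
    · subst hx
      have hT : T = List.replicate (T.count x) x ++ T.filter (fun y => x < y) :=
        ih hs.of_cons (fun y hy => hxT y hy)
      rw [List.count_cons_self, List.replicate_succ]
      simp only [List.filter_cons, lt_irrefl, decide_false]
      exact congrArg (x :: ·) hT
    · have hvx : v < x := lt_of_le_of_ne (hlb x (by simp)) (fun h => hx h.symm)
      have hc : (x :: T).count v = 0 := by
        rw [List.count_eq_zero]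
        intro hv
        rcases List.mem_cons.mp hv with h | h
        · omega
        · have := hxT v h; omega
      have hf : (x :: T).filter (fun y => v < y) = x :: T := by
        rw [List.filter_eq_self]
        intro y hy
        rcases List.mem_cons.mp hy with h | h
        · subst h; simpa using hvx
        · have := hxT y h; simp; omega
      rw [hc, hf]; simp

lemma foldl_eq_of_mem {α β : Type} (l : List α) (f g : β → α → β)
    (h : ∀ x ∈ l, ∀ b, f b x = g b x) : ∀ b, l.foldl f b = l.foldl g b := by
  induction l with
  | nil => intro b; rfl
  | cons x T ih =>
    intro b
    simp only [List.foldl_cons, h x (by simp)]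
    exact ih (fun y hy b' => h y (by simp [hy]) b') _

lemma main_fold (k : Nat) : ∀ (v : Int) (S : List Int) (ans cnt : Int), 1 ≤ v → 0 ≤ cnt → cnt < v →
    S.Pairwise (· ≤ ·) → (∀ x ∈ S, v ≤ x ∧ x < v + k) →
    ((PySem.List.pyRange v (v + k) 1).foldl
        (fun (p : Int × Int) w => (p.1 + PySem.Int.floordiv (p.2 + (S.count w : Int)) w,
                                   PySem.Int.mod (p.2 + (S.count w : Int)) w)) (ans, cnt)).1
      = (S.foldl solutionStepV (ans, cnt)).1 := by
  induction k with
  | zero =>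
    intro v S ans cnt hv h0 hlt hs hb
    have hS : S = [] := by
      cases S with
      | nil => rfl
      | cons x T => have := hb x (by simp); push_cast at this; omega
    subst hS
    rw [PySem.List.pyRange_one_eq_nil (by push_cast; omega)]
    rfl
  | succ k ih =>
    intro v S ans cnt hv h0 hlt hs hb
    have hvk : v < v + ((k : Int) + 1) := by omega
    have hsplit := sorted_split v S hs (fun x hx => (hb x hx).1)
    have hcnt : (0:Int) ≤ cnt + S.count v := by positivity
    have hrhs : (S.foldl solutionStepV (ans, cnt)).1
        = ((S.filter (fun x => v < x)).foldl solutionStepV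
            (ans + (cnt + S.count v) / v, (cnt + S.count v) % v)).1 := by
      conv_lhs => rw [hsplit]
      rw [List.foldl_append, foldV_replicate v hv _ ans cnt h0 hlt]
    push_cast
    rw [show v + ((k:Int) + 1) = v + (k + 1 : Nat) by push_cast; ring] at hvk ⊢
    rw [PySem.List.pyRange_one_cons (by push_cast at hvk ⊢; omega)]
    simp only [List.foldl_cons]
    rw [PySem.Int.floordiv_eq_ediv_of_pos (by omega), PySem.Int.mod_eq_emod_of_pos (by omega)]
    rw [hrhs]
    have hcong := foldl_eq_of_mem (PySem.List.pyRange (v+1) (v + (k+1:Nat)) 1)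
        (fun (p : Int × Int) w => (p.1 + PySem.Int.floordiv (p.2 + (S.count w : Int)) w,
                                   PySem.Int.mod (p.2 + (S.count w : Int)) w))
        (fun (p : Int × Int) w => (p.1 + PySem.Int.floordiv (p.2 + ((S.filter (fun x => v < x)).count w : Int)) w,
                                   PySem.Int.mod (p.2 + ((S.filter (fun x => v < x)).count w : Int)) w))
        (by
          intro w hw b
          have hwv : v < w := by
            have := (PySem.List.mem_pyRange_one.mp hw).1; omega
          dsimp only
          rw [List.count_filter (by simpa using hwv)])
    rw [hcong]
    have hk : v + (k+1:Nat) = (v+1) + (k:Int) := by push_cast; ring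
    rw [hk]
    apply ih (v+1) (S.filter (fun x => v < x)) _ _ (by omega)
        (Int.emod_nonneg _ (by omega)) (by have := Int.emod_lt_of_pos (cnt + S.count v) (by omega : (0:Int) < v); omega)
        (hs.filter _)
    intro x hx
    have hmem := List.mem_filter.mp hx
    have hb' := hb x hmem.1
    have : v < x := by simpa using hmem.2
    push_cast at hb' ⊢
    omega

theorem solution_eq_alt (n : Int) (array : List Int) : solution n array = solution_alt n array := by
  unfold solution solution_alt
  simp only []
  set m : Int := (array.length : Int) with hm
  set L := PySem.List.sorted array id false with hL
  set S := L.map (solutionClamp m) with hS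
  have hperm : L.Perm array := PySem.List.sorted_perm array id false
  have hLp : L.Pairwise (· ≤ ·) := by
    simpa using PySem.List.sorted_pairwise (xs := array) (key := id)
  have hmono : ∀ a b : Int, a ≤ b → solutionClamp m a ≤ solutionClamp m b := by
    intro a b hab
    simp only [solutionClamp]
    split_ifs <;> omega
  have hm0 : 0 ≤ m := by positivity
  have hSp : S.Pairwise (· ≤ ·) := hLp.map _ hmono
  have hSb : ∀ x ∈ S, (1:Int) ≤ x ∧ x < 1 + ((array.length + 1 : Nat) : Int) := by
    intro x hx
    obtain ⟨y, _, rfl⟩ := List.mem_map.mp hx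
    simp only [solutionClamp]
    push_cast
    split_ifs <;> omega
  have hcounts : (array.foldl (fun d num => d.insert (solutionClamp m num) (d.getD (solutionClamp m num) 0 + 1)) PySem.Dict.empty)
      = PySem.Dict.counter (array.map (solutionClamp m)) := by
    have h := PySem.Dict.foldl_insert_getD_add_one_eq_counter (xs := array.map (solutionClamp m))
    rw [List.foldl_map] at h
    exact h
  have hstep : solutionStepB (array.foldl (fun d num => d.insert (solutionClamp m num) (d.getD (solutionClamp m num) 0 + 1)) PySem.Dict.empty)
      = fun (p : Int × Int) w => (p.1 + PySem.Int.floordiv (p.2 + (S.count w : Int)) w,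
                                  PySem.Int.mod (p.2 + (S.count w : Int)) w) := by
    funext p w
    have hcw : (array.map (solutionClamp m)).count w = S.count w :=
      (hperm.map (solutionClamp m)).count_eq w |>.symm
    simp only [solutionStepB, hcounts, PySem.Dict.getD_counter, hcw]
  rw [hstep]
  have hrange : m + 2 = 1 + ((array.length + 1 : Nat) : Int) := by push_cast; ring
  rw [hrange, main_fold (array.length + 1) 1 S 0 0 (by omega) (by omega) (by omega) hSp hSb]
  rw [foldA_eq_foldC L 0 0 0 le_rfl (fun x _ => by omega) hLp]
  rw [foldC_eq_foldV L m 0 0 le_rfl (by simp [hL, PySem.List.length_sorted, hm])]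

-- ===== VERDICT (by name: the statement is the Claim_ definition above) =====
theorem solution_spec : Claim_equal_solution := by
  intro n array _
  exact solution_eq_alt n array
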